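-- pv_equiv track=rewrite | github.com/hyorin/programmers | python/level_2/maze_lever.py | bfs
-- ===== SOURCE A (Python) =====
-- def bfs(maps, visited, start_x, start_y, end_x, end_y, path):
--     if (start_x, start_y) == (end_x, end_y):
--         return True  # 출구에 도착한 경우
--
--     visited[start_x][start_y] = True
--
--     # 인접한 칸을 탐색합니다.
--     for direction_x, direction_y in ((-1, 0), (1, 0), (0, -1), (0, 1)):
--         next_x, next_y = start_x + direction_x, start_y + direction_y
--         if 0 <= next_x < len(maps) and 0 <= next_y < len(maps[0]) and maps[next_x][next_y] != "X" and not visited[next_x][next_y]: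
--             path.append((next_x, next_y))
--             if bfs(maps, visited, next_x, next_y, end_x, end_y, path):
--                 return True
--             path.pop()  # 탐색 실패시 해당 노드에서의 경로 삭제
--
--     return False
-- ===== SOURCE B (Python) =====
-- # Iterative DFS with an explicit stack of (cell, next-direction-index) frames,
-- # replacing A's recursion; same traversal order, same visited/path mutations.
-- def bfs(maps, visited, start_x, start_y, end_x, end_y, path):
--     if (start_x, start_y) == (end_x, end_y):
--         return True
--
--     directions = ((-1, 0), (1, 0), (0, -1), (0, 1))
--     visited[start_x][start_y] = True
--     stack = [(start_x, start_y, 0)]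
--     while stack:
--         x, y, i = stack[-1]
--         if i == len(directions):
--             stack.pop()
--             if stack:
--                 path.pop()
--             continue
--         stack[-1] = (x, y, i + 1)
--         next_x, next_y = x + directions[i][0], y + directions[i][1]
--         if 0 <= next_x < len(maps) and 0 <= next_y < len(maps[0]) and maps[next_x][next_y] != "X" and not visited[next_x][next_y]:
--             path.append((next_x, next_y))
--             if (next_x, next_y) == (end_x, end_y):
--                 return True
--             visited[next_x][next_y] = True
--             stack.append((next_x, next_y, 0))
--     return False
-- ===== Notes on version B (the rewrite author's own statement) =====
-- stated objective: alternative
-- what changed: A's recursive backtracking DFS is replaced by an iterative DFS driven by an explicit stack of (cell, next-direction-index) frames, with the same visit order and the same visited/path mutations.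
-- outside the precondition, e.g. on bfs([['X', 'X'], ['X', 'X']], [[False, False]], 0, 0, 1, 1, []): A returns False, B returns False
import Mathlib
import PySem

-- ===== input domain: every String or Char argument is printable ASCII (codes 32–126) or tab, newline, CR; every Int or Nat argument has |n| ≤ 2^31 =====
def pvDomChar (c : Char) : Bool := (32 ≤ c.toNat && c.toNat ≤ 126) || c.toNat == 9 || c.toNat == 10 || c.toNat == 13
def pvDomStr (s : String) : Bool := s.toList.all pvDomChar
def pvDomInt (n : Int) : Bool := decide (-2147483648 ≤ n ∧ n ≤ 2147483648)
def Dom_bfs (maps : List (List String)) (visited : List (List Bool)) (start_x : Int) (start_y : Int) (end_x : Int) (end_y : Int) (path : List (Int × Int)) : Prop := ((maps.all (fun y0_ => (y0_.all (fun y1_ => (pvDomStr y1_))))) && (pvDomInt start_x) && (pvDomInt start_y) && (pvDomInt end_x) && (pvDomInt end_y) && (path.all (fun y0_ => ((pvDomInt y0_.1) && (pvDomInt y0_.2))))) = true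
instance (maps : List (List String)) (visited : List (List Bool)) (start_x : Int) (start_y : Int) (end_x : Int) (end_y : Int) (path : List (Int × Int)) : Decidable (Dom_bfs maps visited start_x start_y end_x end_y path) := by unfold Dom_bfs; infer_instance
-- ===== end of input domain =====

-- B replaces A's recursive DFS by an iterative DFS over an explicit stack of
-- (cell, remaining-directions) frames (objective: alternative decomposition).
-- A mutates `visited` and `path` in place; B performs the very same mutations,
-- and the equivalence proved here is about the RETURN value.
-- In both Lean ports the Nat `fuel` is only a termination device (never
-- exhausted for the seeded value); the equivalence below holds for every fuel.

-- shared primitives (Python's grid read/write and the direction tuple, used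
-- verbatim by both Python versions)
def pvDirs : List (Int × Int) := [(-1, 0), (1, 0), (0, -1), (0, 1)]

-- visited[x][y] = True  (Python index semantics: negative wraps; out of range
-- would raise, which Pre_ excludes — pySetD/pyGetD are exact inside Pre_)
def pvMark (v : List (List Bool)) (x y : Int) : List (List Bool) :=
  PySem.List.pySetD v x (PySem.List.pySetD (PySem.List.pyGetD v x []) y true)

-- the neighbour guard of both versions (all reads are at guarded non-negative
-- in-range indices inside Pre_, so pyGetD's default is never the value used)
def pvGuard (maps : List (List String)) (v : List (List Bool)) (nx ny : Int) : Bool :=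
  decide (0 ≤ nx) && decide (nx < PySem.List.len maps) &&
  decide (0 ≤ ny) && decide (ny < PySem.List.len (PySem.List.pyGetD maps 0 [])) &&
  decide (PySem.List.pyGetD (PySem.List.pyGetD maps nx []) ny "" ≠ "X") &&
  !(PySem.List.pyGetD (PySem.List.pyGetD v nx []) ny false)

def pvCountFalse (v : List (List Bool)) : Nat := (v.map (fun r => r.count false)).sum

-- ===== PORT A =====
-- A's for-loop over the remaining directions with its early return; the
-- recursive call of A is abstracted as `child` so the recursion is structural
def bfsScan (maps : List (List String))
    (child : List (List Bool) → List (Int × Int) → Int → Int →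
      Bool × List (List Bool) × List (Int × Int)) :
    List (List Bool) → List (Int × Int) → Int → Int → List (Int × Int) →
    Bool × List (List Bool) × List (Int × Int)
  | v, p, _, _, [] => (false, v, p)
  | v, p, x, y, d :: ds =>
    if pvGuard maps v (x + d.1) (y + d.2) then
      match child v (p ++ [(x + d.1, y + d.2)]) (x + d.1) (y + d.2) with
      | (true, v', p') => (true, v', p')
      | (false, v', p') => bfsScan maps child v' p'.dropLast x y ds   -- path.pop()
    else bfsScan maps child v p x y ds

-- one recursive call of A: entry end-check, mark visited, scan the directions
-- (f is a termination device only, never exhausted for the seeded value; the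
-- entry end-check is the first line of A and is written in both fuel arms)
def bfsGo (maps : List (List String)) (ex ey : Int) :
    Nat → List (List Bool) → List (Int × Int) → Int → Int →
    Bool × List (List Bool) × List (Int × Int)
  | 0, v, p, x, y =>
    if x = ex ∧ y = ey then (true, v, p) else (false, v, p)
  | f' + 1, v, p, x, y =>
    if x = ex ∧ y = ey then (true, v, p)
    else
      bfsScan maps (fun v' p' x' y' => bfsGo maps ex ey f' v' p' x' y')
        (pvMark v x y) p x y pvDirs

def bfs (maps : List (List String)) (visited : List (List Bool)) (start_x : Int) (start_y : Int) (end_x : Int) (end_y : Int) (path : List (Int × Int)) : Bool :=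
  (bfsGo maps end_x end_y (pvCountFalse visited + 2) visited path start_x start_y).1

-- ===== PORT B =====
-- frame = (x, y, remaining directions, fuel for this frame's children)
def pvWt (st : List (Int × Int × List (Int × Int) × Nat)) : Nat :=
  (st.map (fun fr => (fr.2.2.1.length + 1) * 6 ^ fr.2.2.2)).sum

-- Source B's while-loop over the explicit stack; the Nat argument is a step
-- counter used only as a termination device (never exhausted for the seeded
-- value, since every step strictly decreases pvWt of the stack)
def bfsMachine (maps : List (List String)) (ex ey : Int) :
    Nat → List (Int × Int × List (Int × Int) × Nat) →
    List (List Bool) → List (Int × Int) → Bool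
  | _, [], _, _ => false
  | 0, _ :: _, _, _ => false
  | n + 1, (_x0, _y0, [], _g0) :: rest, v, p =>   -- directions exhausted: pop frame, pop path
      bfsMachine maps ex ey n rest v (if rest.isEmpty then p else p.dropLast)
  | n + 1, (x, y, d :: ds, g) :: rest, v, p =>
    if pvGuard maps v (x + d.1) (y + d.2) then
      if (x + d.1) = ex ∧ (y + d.2) = ey then true
      else if g = 0 then
        bfsMachine maps ex ey n ((x, y, ds, g) :: rest) v p
      else
        bfsMachine maps ex ey n
          ((x + d.1, y + d.2, pvDirs, g - 1) :: (x, y, ds, g) :: rest)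
          (pvMark v (x + d.1) (y + d.2)) (p ++ [(x + d.1, y + d.2)])
    else bfsMachine maps ex ey n ((x, y, ds, g) :: rest) v p

def bfs_alt (maps : List (List String)) (visited : List (List Bool)) (start_x : Int) (start_y : Int) (end_x : Int) (end_y : Int) (path : List (Int × Int)) : Bool :=
  if start_x = end_x ∧ start_y = end_y then true
  else
    bfsMachine maps end_x end_y
      (pvWt [(start_x, start_y, pvDirs, pvCountFalse visited + 1)])
      [(start_x, start_y, pvDirs, pvCountFalse visited + 1)]
      (pvMark visited start_x start_y) path

-- ===== PRECONDITION & SPEC =====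
-- Pre_ excludes (unless start equals end, where A returns True immediately)
-- inputs on which Python A can raise IndexError: a start coordinate outside
-- Python's index range of `visited`, `visited` with fewer rows than `maps`, or
-- a row of `maps`/`visited` shorter than maps[0]; on the excluded inputs where
-- a short row is simply never reached A still returns, and B returns the same
-- value there (see cites).
def Pre_bfs (maps : List (List String)) (visited : List (List Bool)) (start_x : Int) (start_y : Int) (end_x : Int) (end_y : Int) (path : List (Int × Int)) : Prop :=
  ((start_x, start_y) = (end_x, end_y)) ∨
  (PySem.Raise.InRange visited.length start_x ∧
   PySem.Raise.InRange (PySem.List.pyGetD visited start_x ([] : List Bool)).length start_y ∧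
   maps.length ≤ visited.length ∧
   (∀ row ∈ maps, (maps.headD []).length ≤ row.length) ∧
   (∀ row ∈ visited, (maps.headD []).length ≤ row.length))
instance (maps : List (List String)) (visited : List (List Bool)) (start_x : Int) (start_y : Int) (end_x : Int) (end_y : Int) (path : List (Int × Int)) : Decidable (Pre_bfs maps visited start_x start_y end_x end_y path) := by unfold Pre_bfs; infer_instance

def pvWitness_bfs : List (List String) × List (List Bool) × Int × Int × Int × Int × (List (Int × Int)) :=
  ([[".", "."], [".", "X"]], [[false, false], [false, false]], 0, 0, 1, 0, [])

def Spec_bfs (maps : List (List String)) (visited : List (List Bool)) (start_x : Int) (start_y : Int) (end_x : Int) (end_y : Int) (path : List (Int × Int)) (out : Bool) : Prop := out = bfs_alt maps visited start_x start_y end_x end_y path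
instance (maps : List (List String)) (visited : List (List Bool)) (start_x : Int) (start_y : Int) (end_x : Int) (end_y : Int) (path : List (Int × Int)) (out : Bool) : Decidable (Spec_bfs maps visited start_x start_y end_x end_y path out) := by unfold Spec_bfs; infer_instance

-- ===== CLAIM (what is proved, stated in full; the proofs are below) =====
def Claim_equal_bfs : Prop := ∀ (maps : List (List String)) (visited : List (List Bool)) (start_x : Int) (start_y : Int) (end_x : Int) (end_y : Int) (path : List (Int × Int)), Dom_bfs maps visited start_x start_y end_x end_y path → Pre_bfs maps visited start_x start_y end_x end_y path → Spec_bfs maps visited start_x start_y end_x end_y path (bfs maps visited start_x start_y end_x end_y path)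

-- ===== LEMMAS AND PROOFS =====

lemma pvWt_cons (x y : Int) (ds : List (Int × Int)) (g : Nat)
    (rest : List (Int × Int × List (Int × Int) × Nat)) :
    pvWt ((x, y, ds, g) :: rest) = (ds.length + 1) * 6 ^ g + pvWt rest := by
  simp [pvWt]

lemma pvWt_rest_lt (x y : Int) (ds : List (Int × Int)) (g : Nat)
    (rest : List (Int × Int × List (Int × Int) × Nat)) :
    pvWt rest < pvWt ((x, y, ds, g) :: rest) := by
  rw [pvWt_cons]
  have h3 : 0 < 6 ^ g := pow_pos (by norm_num) g
  have h4 : 0 < (ds.length + 1) * 6 ^ g := Nat.mul_pos (by omega) h3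
  omega

lemma pvWt_cons_pos (x y : Int) (ds : List (Int × Int)) (g : Nat)
    (rest : List (Int × Int × List (Int × Int) × Nat)) :
    0 < pvWt ((x, y, ds, g) :: rest) := by
  have := pvWt_rest_lt x y ds g rest; omega

lemma pvWt_skip (x y : Int) (d : Int × Int) (ds : List (Int × Int)) (g : Nat)
    (rest : List (Int × Int × List (Int × Int) × Nat)) :
    pvWt ((x, y, ds, g) :: rest) < pvWt ((x, y, d :: ds, g) :: rest) := by
  rw [pvWt_cons, pvWt_cons]
  have h3 : 0 < 6 ^ g := pow_pos (by norm_num) g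
  have h4 : (ds.length + 1 + 1) * 6 ^ g = (ds.length + 1) * 6 ^ g + 6 ^ g :=
    Nat.succ_mul _ _
  simp only [List.length_cons]
  omega

lemma pvWt_push (nx ny x y : Int) (d : Int × Int) (ds : List (Int × Int)) (g' : Nat)
    (rest : List (Int × Int × List (Int × Int) × Nat)) :
    pvWt ((nx, ny, pvDirs, g') :: (x, y, ds, g' + 1) :: rest)
      < pvWt ((x, y, d :: ds, g' + 1) :: rest) := by
  rw [pvWt_cons, pvWt_cons, pvWt_cons]
  have h2 : (6 : Nat) ^ (g' + 1) = 6 * 6 ^ g' := pow_succ' 6 g'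
  have h3 : 0 < (6 : Nat) ^ g' := pow_pos (by norm_num) g'
  have h4 : (ds.length + 1 + 1) * 6 ^ (g' + 1)
      = (ds.length + 1) * 6 ^ (g' + 1) + 6 ^ (g' + 1) := Nat.succ_mul _ _
  simp only [List.length_cons, pvDirs, List.length_cons, List.length_nil]
  omega

-- above the threshold pvWt, the step counter does not matter
lemma bfsMachine_mono (maps : List (List String)) (ex ey : Int) :
    ∀ (n : Nat), ∀ (k : Nat) (st : List (Int × Int × List (Int × Int) × Nat))
      (v : List (List Bool)) (p : List (Int × Int)),
      pvWt st ≤ n → pvWt st ≤ k →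
      bfsMachine maps ex ey n st v p = bfsMachine maps ex ey k st v p := by
  intro n
  induction n using Nat.strong_induction_on with
  | _ n IH =>
    intro k st v p hn hk
    match st with
    | [] =>
      cases n <;> cases k <;> simp only [bfsMachine]
    | (x, y, ds, g) :: rest =>
      have hpos := pvWt_cons_pos x y ds g rest
      obtain ⟨n', rfl⟩ : ∃ n', n = n' + 1 := ⟨n - 1, by omega⟩
      obtain ⟨k', rfl⟩ : ∃ k', k = k' + 1 := ⟨k - 1, by omega⟩
      match ds with
      | [] =>
        simp only [bfsMachine]
        have hlt := pvWt_rest_lt x y ([] : List (Int × Int)) g rest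
        exact IH n' (by omega) k' rest v _ (by omega) (by omega)
      | d :: ds =>
        simp only [bfsMachine]
        by_cases hG : pvGuard maps v (x + d.1) (y + d.2) = true
        · rw [if_pos hG, if_pos hG]
          by_cases hend : (x + d.1) = ex ∧ (y + d.2) = ey
          · rw [if_pos hend, if_pos hend]
          · rw [if_neg hend, if_neg hend]
            by_cases hg : g = 0
            · rw [if_pos hg, if_pos hg]
              have hlt := pvWt_skip x y d ds g rest
              exact IH n' (by omega) k' _ v p (by omega) (by omega)
            · rw [if_neg hg, if_neg hg]
              obtain ⟨g', rfl⟩ : ∃ g', g = g' + 1 := ⟨g - 1, by omega⟩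
              have hlt := pvWt_push (x + d.1) (y + d.2) x y d ds g' rest
              simp only [Nat.add_sub_cancel]
              exact IH n' (by omega) k' _ _ _ (by omega) (by omega)
        · rw [if_neg hG, if_neg hG]
          have hlt := pvWt_skip x y d ds g rest
          exact IH n' (by omega) k' _ v p (by omega) (by omega)

-- simulation: the machine with top frame (x, y, ds, g) behaves like A's
-- direction scan at fuel g, then continues with the rest of the stack
lemma bfsMachine_frame (maps : List (List String)) (ex ey : Int) :
    ∀ (g : Nat) (ds : List (Int × Int)) (x y : Int)
      (rest : List (Int × Int × List (Int × Int) × Nat))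
      (v : List (List Bool)) (p : List (Int × Int)) (n : Nat),
      pvWt ((x, y, ds, g) :: rest) ≤ n →
      bfsMachine maps ex ey n ((x, y, ds, g) :: rest) v p =
        (match bfsScan maps (fun v' p' x' y' => bfsGo maps ex ey g v' p' x' y')
            v p x y ds with
         | (true, _, _) => true
         | (false, v', p') =>
             bfsMachine maps ex ey (pvWt rest) rest v'
               (if rest.isEmpty then p' else p'.dropLast)) := by
  intro g
  induction g using Nat.strong_induction_on with
  | _ g IH =>
    intro ds x y rest v p
    induction ds generalizing v p with
    | nil =>
      intro n hn
      have hpos := pvWt_cons_pos x y [] g rest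
      obtain ⟨n', rfl⟩ : ∃ n', n = n' + 1 := ⟨n - 1, by omega⟩
      simp only [bfsMachine, bfsScan]
      have hlt := pvWt_rest_lt x y ([] : List (Int × Int)) g rest
      exact bfsMachine_mono maps ex ey n' (pvWt rest) rest v _ (by omega) le_rfl
    | cons d ds ih =>
      intro n hn
      have hpos := pvWt_cons_pos x y (d :: ds) g rest
      obtain ⟨n', rfl⟩ : ∃ n', n = n' + 1 := ⟨n - 1, by omega⟩
      by_cases hG : pvGuard maps v (x + d.1) (y + d.2) = true
      · by_cases hend : (x + d.1) = ex ∧ (y + d.2) = ey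
        · have hMach : bfsMachine maps ex ey (n' + 1) ((x, y, d :: ds, g) :: rest) v p
              = true := by
            simp only [bfsMachine, hG, if_true, if_pos hend]
          have hLoop : bfsScan maps (fun v' p' x' y' => bfsGo maps ex ey g v' p' x' y')
              v p x y (d :: ds) = (true, v, p ++ [(x + d.1, y + d.2)]) := by
            cases g with
            | zero =>
              conv_lhs => rw [bfsScan]
              rw [if_pos hG]
              simp only [bfsGo]
              rw [if_pos hend]
            | succ g' =>
              conv_lhs => rw [bfsScan]
              rw [if_pos hG]
              simp only [bfsGo]
              rw [if_pos hend]
          rw [hMach, hLoop]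
        · by_cases hg0 : g = 0
          · subst hg0
            have hMach : bfsMachine maps ex ey (n' + 1) ((x, y, d :: ds, 0) :: rest) v p
                = bfsMachine maps ex ey n' ((x, y, ds, 0) :: rest) v p := by
              simp only [bfsMachine, hG, if_true, if_neg hend]
            have hLoop : bfsScan maps (fun v' p' x' y' => bfsGo maps ex ey 0 v' p' x' y')
                  v p x y (d :: ds)
                = bfsScan maps (fun v' p' x' y' => bfsGo maps ex ey 0 v' p' x' y')
                  v p x y ds := by
              conv_lhs => rw [bfsScan]
              rw [if_pos hG]
              simp only [bfsGo]
              rw [if_neg hend]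
              simp only [List.dropLast_concat]
            have hlt := pvWt_skip x y d ds 0 rest
            rw [hMach, hLoop, ih v p n' (by omega)]
          · obtain ⟨g', rfl⟩ : ∃ g', g = g' + 1 := ⟨g - 1, by omega⟩
            have hMach : bfsMachine maps ex ey (n' + 1) ((x, y, d :: ds, g' + 1) :: rest) v p
                = bfsMachine maps ex ey n'
                    ((x + d.1, y + d.2, pvDirs, g') :: (x, y, ds, g' + 1) :: rest)
                    (pvMark v (x + d.1) (y + d.2)) (p ++ [(x + d.1, y + d.2)]) := by
              simp only [bfsMachine, hG, if_true, if_neg hend,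
                if_neg (by omega : ¬ g' + 1 = 0), Nat.add_sub_cancel]
            have hLoop : bfsScan maps
                  (fun v' p' x' y' => bfsGo maps ex ey (g' + 1) v' p' x' y')
                  v p x y (d :: ds)
                = (match bfsScan maps
                      (fun v' p' x' y' => bfsGo maps ex ey g' v' p' x' y')
                      (pvMark v (x + d.1) (y + d.2)) (p ++ [(x + d.1, y + d.2)])
                      (x + d.1) (y + d.2) pvDirs with
                   | (true, v', p') => (true, v', p')
                   | (false, v', p') =>
                       bfsScan maps
                         (fun v' p' x' y' => bfsGo maps ex ey (g' + 1) v' p' x' y')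
                         v' p'.dropLast x y ds) := by
              conv_lhs => rw [bfsScan]
              rw [if_pos hG]
              simp only [bfsGo]
              rw [if_neg hend]
            have hlt := pvWt_push (x + d.1) (y + d.2) x y d ds g' rest
            rw [hMach, hLoop, IH g' (by omega) pvDirs (x + d.1) (y + d.2)
              ((x, y, ds, g' + 1) :: rest) _ _ n' (by omega)]
            rcases hL : bfsScan maps
                (fun v' p' x' y' => bfsGo maps ex ey g' v' p' x' y')
                (pvMark v (x + d.1) (y + d.2)) (p ++ [(x + d.1, y + d.2)])
                (x + d.1) (y + d.2) pvDirs with ⟨b, v', p'⟩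
            cases b
            · simp only [List.isEmpty_cons]
              exact ih v' p'.dropLast (pvWt ((x, y, ds, g' + 1) :: rest)) le_rfl
            · rfl
      · have hMach : bfsMachine maps ex ey (n' + 1) ((x, y, d :: ds, g) :: rest) v p
            = bfsMachine maps ex ey n' ((x, y, ds, g) :: rest) v p := by
          simp only [bfsMachine, hG]; rfl
        have hLoop : bfsScan maps (fun v' p' x' y' => bfsGo maps ex ey g v' p' x' y')
              v p x y (d :: ds)
            = bfsScan maps (fun v' p' x' y' => bfsGo maps ex ey g v' p' x' y')
              v p x y ds := by
          simp only [bfsScan, hG]; rfl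
        have hlt := pvWt_skip x y d ds g rest
        rw [hMach, hLoop, ih v p n' (by omega)]

theorem bfs_spec_total (maps : List (List String)) (visited : List (List Bool)) (start_x : Int) (start_y : Int) (end_x : Int) (end_y : Int) (path : List (Int × Int)) :
    bfs maps visited start_x start_y end_x end_y path
      = bfs_alt maps visited start_x start_y end_x end_y path := by
  unfold bfs bfs_alt
  rw [show pvCountFalse visited + 2 = (pvCountFalse visited + 1) + 1 by omega]
  by_cases hend : start_x = end_x ∧ start_y = end_y
  · rw [if_pos hend]
    simp only [bfsGo]
    rw [if_pos hend]
  · rw [if_neg hend]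
    have hGo : bfsGo maps end_x end_y ((pvCountFalse visited + 1) + 1)
          visited path start_x start_y
        = bfsScan maps
            (fun v' p' x' y' => bfsGo maps end_x end_y (pvCountFalse visited + 1) v' p' x' y')
            (pvMark visited start_x start_y) path start_x start_y pvDirs := by
      simp only [bfsGo]
      rw [if_neg hend]
    rw [hGo, bfsMachine_frame maps end_x end_y (pvCountFalse visited + 1) pvDirs
      start_x start_y [] (pvMark visited start_x start_y) path _ le_rfl]
    rcases hL : bfsScan maps
        (fun v' p' x' y' => bfsGo maps end_x end_y (pvCountFalse visited + 1) v' p' x' y')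
        (pvMark visited start_x start_y) path start_x start_y pvDirs with ⟨b, v', p'⟩
    cases b
    · simp only [bfsMachine]
    · rfl

-- ===== VERDICT (by name: the statement is the Claim_ definition above) =====
theorem bfs_spec : Claim_equal_bfs := by
  intro maps visited sx sy ex ey p _ _
  exact bfs_spec_total maps visited sx sy ex ey p
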